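-- pv_equiv track=rewrite | github.com/Tatoloops/PublicRepository | Python/Exercises03/Taller.py | checkLista
-- ===== SOURCE A (Python) =====
-- def checkLista(array,x):
-- 	if len(array)>=1:
-- 		if array[0]==x:
-- 			return False
-- 		else:
-- 			return checkLista(array[1:],x)
-- 	else:
-- 		return True
-- ===== SOURCE B (Python) =====
-- def checkLista(array, x):
--     res = True
--     for elem in array:
--         if elem == x:
--             res = False
--     return res
-- ===== Notes on version B (the rewrite author's own statement) =====
-- stated objective: faster
-- what changed: Replaced the tail recursion on array[1:] (which copies the remaining list at every step, O(n^2) total) by a single O(n) iterative flag-accumulating loop over the elements.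
import Mathlib
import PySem

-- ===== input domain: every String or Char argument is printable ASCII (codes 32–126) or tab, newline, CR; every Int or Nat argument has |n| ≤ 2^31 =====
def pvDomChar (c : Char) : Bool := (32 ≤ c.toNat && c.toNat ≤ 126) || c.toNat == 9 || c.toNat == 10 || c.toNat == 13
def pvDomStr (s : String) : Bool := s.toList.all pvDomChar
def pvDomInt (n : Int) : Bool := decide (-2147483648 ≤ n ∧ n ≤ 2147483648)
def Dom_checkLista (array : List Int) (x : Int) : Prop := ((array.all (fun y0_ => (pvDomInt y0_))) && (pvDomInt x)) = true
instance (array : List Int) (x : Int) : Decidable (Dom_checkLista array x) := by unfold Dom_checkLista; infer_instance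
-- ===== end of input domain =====

-- B replaces A's tail recursion on array[1:] by one iterative flag-accumulating loop (alternative decomposition).

-- ===== PORT A =====
-- literal transliteration of A: test len ≥ 1, compare head, recurse on the tail slice
def checkLista (array : List Int) (x : Int) : Bool :=
  if (array.length : Int) ≥ 1 then
    if array.headI == x then
      false
    else
      checkLista (PySem.List.slice array (some 1) none) x
  else
    true
termination_by array.length
decreasing_by
  simp_all [PySem.List.slice]
  omega

-- ===== PORT B =====
-- literal transliteration of B: res = True; for elem in array: if elem == x: res = False; return res
def checkLista_alt (array : List Int) (x : Int) : Bool :=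
  array.foldl (fun res elem => if elem == x then false else res) true

-- ===== PRECONDITION & SPEC =====
def Spec_checkLista (array : List Int) (x : Int) (out : Bool) : Prop := out = checkLista_alt array x
instance (array : List Int) (x : Int) (out : Bool) : Decidable (Spec_checkLista array x out) := by unfold Spec_checkLista; infer_instance

-- ===== CLAIM (what is proved, stated in full; the proofs are below) =====
def Claim_equal_checkLista : Prop := ∀ (array : List Int) (x : Int), Dom_checkLista array x → Spec_checkLista array x (checkLista array x)

-- ===== LEMMAS AND PROOFS =====
theorem checkLista_alt_cons (a : Int) (l : List Int) (x : Int) :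
    checkLista_alt (a :: l) x = if a == x then false else checkLista_alt l x := by
  unfold checkLista_alt
  simp only [List.foldl_cons]
  by_cases h : a == x
  · simp only [h, if_true]
    induction l with
    | nil => simp
    | cons b t ih => rw [List.foldl_cons]; split <;> exact ih
  · simp [h]

theorem checkLista_eq_alt (array : List Int) (x : Int) :
    checkLista array x = checkLista_alt array x := by
  induction array with
  | nil => simp [checkLista, checkLista_alt]
  | cons a l ih =>
    rw [checkLista, checkLista_alt_cons]
    have hslice : PySem.List.slice (a :: l) (some 1) none = l := by
      simp [PySem.List.slice_from_one]
    simp only [List.length_cons]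
    have hlen : ((l.length : Int) + 1 ≥ 1) := by omega
    rw [if_pos (by push_cast; omega)]
    simp only [List.headI]
    by_cases h : a == x
    · simp [h]
    · simp only [h, Bool.false_eq_true, if_false]
      simpa [PySem.List.slice_from_one] using ih

-- ===== VERDICT (by name: the statement is the Claim_ definition above) =====
theorem checkLista_spec : Claim_equal_checkLista := by
  intro array x _
  exact checkLista_eq_alt array x
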